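-- pv_equiv track=rewrite | github.com/981377660LMT/algorithm-study | tmp/20220925专场/2.py | longestESR
-- ===== SOURCE A (Python) =====
-- from typing import List, Tuple, Optional
--
-- def longestESR(sales: List[int]) -> int:
--     pre = dict({0: -1})
--     res = cursum = 0
--
--     for i, h in enumerate(sales):
--         cursum += 1 if h > 8 else -1
--         if cursum > 0:
--             res = i + 1
--         if cursum - 1 in pre:
--             res = max(res, i - pre[cursum - 1])
--         pre.setdefault(cursum, i)
--     return res
-- ===== SOURCE B (Python) =====
-- from typing import List
--
-- def longestESR(sales: List[int]) -> int:
--     n = len(sales)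
--     prefix = [0]
--     for s in sales:
--         prefix.append(prefix[-1] + (1 if s > 8 else -1))
--     res = 0
--     for j in range(1, n + 1):
--         for i in range(j):
--             if prefix[j] - prefix[i] > 0:
--                 res = max(res, j - i)
--     return res
-- ===== Notes on version B (the rewrite author's own statement) =====
-- stated objective: alternative
-- what changed: Replaces A's one-pass hashmap of first prefix-sum occurrences by an explicit prefix-sum array scanned with a nested loop over all interval endpoints, taking the longest interval with a positive sum.
import Mathlib
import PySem

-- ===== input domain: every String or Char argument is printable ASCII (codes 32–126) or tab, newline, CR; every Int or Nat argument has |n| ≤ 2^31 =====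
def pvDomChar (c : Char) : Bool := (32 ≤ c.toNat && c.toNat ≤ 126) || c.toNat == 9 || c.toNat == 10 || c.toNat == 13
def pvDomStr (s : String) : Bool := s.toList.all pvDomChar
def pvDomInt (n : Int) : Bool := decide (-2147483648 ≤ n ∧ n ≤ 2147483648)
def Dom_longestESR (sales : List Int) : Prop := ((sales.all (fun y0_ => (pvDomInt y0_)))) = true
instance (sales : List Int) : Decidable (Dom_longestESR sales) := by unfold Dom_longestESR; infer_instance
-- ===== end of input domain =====

-- B replaces A's one-pass first-occurrence hashmap of prefix sums by an explicit prefix-sum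
-- array scanned over all interval endpoint pairs (objective: alternative decomposition; B is O(n^2), A is O(n)).

-- ===== PORT A =====
def esrStep (st : PySem.Dict Int Int × Int × Int) (p : Int × Int) :
    PySem.Dict Int Int × Int × Int :=
  let pre := st.1
  let res := st.2.1
  let cursum := st.2.2 + (if p.2 > 8 then (1 : Int) else -1)
  let res := if cursum > 0 then p.1 + 1 else res
  let res := if pre.contains (cursum - 1) then max res (p.1 - pre.getD (cursum - 1) 0) else res
  (pre.setdefault cursum p.1, res, cursum)

def longestESR (sales : List Int) : Int :=
  ((PySem.List.enumerate sales).foldl esrStep ((PySem.Dict.empty).insert 0 (-1), 0, 0)).2.1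

-- ===== PORT B =====
def esrPfxStep (pf : List Int) (s : Int) : List Int :=
  pf ++ [PySem.List.pyGetD pf (-1) 0 + (if s > 8 then (1 : Int) else -1)]

def esrInner (pfx : List Int) (res : Int) (j : Int) : Int :=
  (PySem.List.pyRange 0 j 1).foldl
    (fun res i =>
      if PySem.List.pyGetD pfx j 0 - PySem.List.pyGetD pfx i 0 > 0 then max res (j - i) else res)
    res

def longestESR_alt (sales : List Int) : Int :=
  let pfx := sales.foldl esrPfxStep [0]
  (PySem.List.pyRange 1 ((sales.length : Int) + 1) 1).foldl (esrInner pfx) 0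

-- ===== PRECONDITION & SPEC =====
def Spec_longestESR (sales : List Int) (out : Int) : Prop := out = longestESR_alt sales
instance (sales : List Int) (out : Int) : Decidable (Spec_longestESR sales out) := by unfold Spec_longestESR; infer_instance

-- ===== CLAIM (what is proved, stated in full; the proofs are below) =====
def Claim_equal_longestESR : Prop := ∀ (sales : List Int), Dom_longestESR sales → Spec_longestESR sales (longestESR sales)

-- ===== LEMMAS AND PROOFS =====

-- the ±1 step of the prefix sum, and the prefix sums themselves
def esrSgn (x : Int) : Int := if x > 8 then 1 else -1
def esrP (sales : List Int) (k : Nat) : Int := ((sales.take k).map esrSgn).sum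

-- a candidate value: the length of an interval with a positive sum
def esrCand (sales : List Int) (v : Int) : Prop :=
  ∃ i j : Nat, i < j ∧ j ≤ sales.length ∧ esrP sales i < esrP sales j ∧ v = (j : Int) - (i : Int)

theorem esrP_zero (sales : List Int) : esrP sales 0 = 0 := rfl

theorem esrP_succ (sales : List Int) (k : Nat) (h : k < sales.length) :
    esrP sales (k + 1) = esrP sales k + esrSgn sales[k] := by
  unfold esrP
  have := List.sum_take_succ (sales.map esrSgn) k (by simpa using h)
  simpa using this

theorem esrP_step (sales : List Int) (k : Nat) :
    esrP sales (k + 1) = esrP sales k + 1 ∨ esrP sales (k + 1) = esrP sales k - 1 ∨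
      esrP sales (k + 1) = esrP sales k := by
  by_cases h : k < sales.length
  · rw [esrP_succ sales k h]
    unfold esrSgn
    split_ifs <;> omega
  · right; right
    unfold esrP
    rw [List.take_of_length_le (by omega), List.take_of_length_le (by omega)]

-- discrete intermediate value theorem, descending form
theorem esr_ivt (sales : List Int) (c : Int) (h0 : c ≤ esrP sales 0) :
    ∀ i : Nat, esrP sales i ≤ c → ∃ m, m ≤ i ∧ esrP sales m = c := by
  intro i
  induction i with
  | zero => intro h; exact ⟨0, le_refl _, le_antisymm h h0⟩
  | succ i ih =>
    intro h
    by_cases he : esrP sales (i + 1) = c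
    · exact ⟨i + 1, le_refl _, he⟩
    · have := esrP_step sales i
      have hi : esrP sales i ≤ c := by omega
      obtain ⟨m, hm, hmc⟩ := ih hi
      exact ⟨m, by omega, hmc⟩

-- a first occurrence below a given one
theorem esr_min_occ (sales : List Int) (s : Int) (m : Nat) (hm : esrP sales m = s) :
    ∃ m0, m0 ≤ m ∧ esrP sales m0 = s ∧ ∀ m' < m0, esrP sales m' ≠ s := by
  have hex : ∃ k, esrP sales k = s := ⟨m, hm⟩
  refine ⟨Nat.find hex, Nat.find_min' hex hm, Nat.find_spec hex, ?_⟩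
  intro m' hm'
  exact Nat.find_min hex hm'

-- generic conditional-max fold lemmas
theorem esr_foldl_infl {β : Type} (g : Int → β → Int) (l : List β)
    (hg : ∀ r x, x ∈ l → r ≤ g r x) (r : Int) : r ≤ l.foldl g r := by
  induction l generalizing r with
  | nil => exact le_refl r
  | cons y t ih =>
    have h1 : r ≤ g r y := hg r y (by simp)
    have h2 : g r y ≤ (t.foldl g (g r y)) := ih (fun r x hx => hg r x (by simp [hx])) _
    simpa using le_trans h1 h2

theorem esr_foldl_mono {β : Type} (g : Int → β → Int) (l : List β)
    (hm : ∀ r r' x, x ∈ l → r ≤ r' → g r x ≤ g r' x) (r r' : Int) (h : r ≤ r') :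
    l.foldl g r ≤ l.foldl g r' := by
  induction l generalizing r r' with
  | nil => simpa using h
  | cons y t ih =>
    simp only [List.foldl_cons]
    exact ih (fun r r' x hx => hm r r' x (by simp [hx])) _ _ (hm r r' y (by simp) h)

theorem esr_foldl_le_of_mem {β : Type} (g : Int → β → Int) (l : List β)
    (hg : ∀ r x, x ∈ l → r ≤ g r x)
    (hm : ∀ r r' x, x ∈ l → r ≤ r' → g r x ≤ g r' x)
    (x : β) (hx : x ∈ l) (v : Int) (hv : ∀ r, v ≤ g r x) (r : Int) :
    v ≤ l.foldl g r := by
  induction l generalizing r with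
  | nil => simp at hx
  | cons y t ih =>
    simp only [List.foldl_cons]
    rcases List.mem_cons.mp hx with h | h
    · subst h
      exact le_trans (hv r) (esr_foldl_infl g t (fun r x hx => hg r x (by simp [hx])) _)
    · exact ih (fun r x hx => hg r x (by simp [hx])) (fun r r' x hx => hm r r' x (by simp [hx])) h _

theorem esr_foldl_zero_or {β : Type} (g : Int → β → Int) (l : List β) (Q : Int → Prop)
    (hc : ∀ r x, x ∈ l → g r x = r ∨ Q (g r x)) (r : Int) :
    l.foldl g r = r ∨ Q (l.foldl g r) := by
  induction l generalizing r with
  | nil => exact Or.inl rfl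
  | cons y t ih =>
    simp only [List.foldl_cons]
    rcases ih (fun r x hx => hc r x (by simp [hx])) (g r y) with h | h
    · rw [h]; exact hc r y (by simp)
    · exact Or.inr h

-- ===== B-side characterisation =====

theorem esr_pfx_scanl (l : List Int) : ∀ (acc : List Int) (a : Int),
    l.foldl esrPfxStep (acc ++ [a]) = acc ++ List.scanl (fun x s => x + esrSgn s) a l := by
  induction l with
  | nil => intro acc a; simp
  | cons s t ih =>
    intro acc a
    simp only [List.foldl_cons, List.scanl_cons]
    have : esrPfxStep (acc ++ [a]) s = (acc ++ [a]) ++ [a + esrSgn s] := by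
      unfold esrPfxStep esrSgn
      rw [PySem.List.pyGetD_neg_one_append_singleton]
    rw [this, ih (acc ++ [a]) (a + esrSgn s)]
    simp

theorem esr_scanl_getD (l : List Int) : ∀ (a : Int) (k : Nat), k ≤ l.length →
    (List.scanl (fun x s => x + esrSgn s) a l).getD k 0 = a + esrP l k := by
  induction l with
  | nil =>
    intro a k hk
    have hk0 : k = 0 := by simpa using hk
    subst hk0
    simp [esrP]
  | cons s t ih =>
    intro a k hk
    cases k with
    | zero => simp [esrP]
    | succ k =>
      simp only [List.scanl_cons, List.getD_cons_succ]
      rw [ih (a + esrSgn s) k (by simpa using hk)]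
      unfold esrP
      simp [List.take_succ_cons, add_assoc]

theorem esr_pfx_getD (sales : List Int) (k : Nat) (hk : k ≤ sales.length) :
    (sales.foldl esrPfxStep [0]).getD k 0 = esrP sales k := by
  have h := esr_pfx_scanl sales [] 0
  simp only [List.nil_append] at h
  rw [h, esr_scanl_getD sales 0 k hk, zero_add]

theorem esr_pfx_length (sales : List Int) :
    (sales.foldl esrPfxStep [0]).length = sales.length + 1 := by
  have h := esr_pfx_scanl sales [] 0
  simp only [List.nil_append] at h
  rw [h, List.length_scanl]

theorem esr_pfx_pyGetD (sales : List Int) (j : Int) (h0 : 0 ≤ j) (hj : j ≤ (sales.length : Int)) :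
    PySem.List.pyGetD (sales.foldl esrPfxStep [0]) j 0 = esrP sales j.toNat := by
  rw [PySem.List.pyGetD_eq_getElem _ _ h0 (by rw [esr_pfx_length]; push_cast; omega)]
  rw [List.getElem_eq_getD]
  exact esr_pfx_getD sales j.toNat (by omega)

theorem esrB_nonneg (sales : List Int) : 0 ≤ longestESR_alt sales := by
  unfold longestESR_alt
  apply esr_foldl_infl
  intro r j _
  apply esr_foldl_infl
  intro r' i _
  split_ifs
  · exact le_max_left _ _
  · exact le_refl _

theorem esrB_cases (sales : List Int) :
    longestESR_alt sales = 0 ∨ esrCand sales (longestESR_alt sales) := by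
  unfold longestESR_alt
  apply esr_foldl_zero_or
  intro r j hj
  apply esr_foldl_zero_or
  intro r' i hi
  split_ifs with hcond
  · rcases max_choice r' (j - i) with h | h
    · exact Or.inl h
    · right
      rw [h]
      rw [PySem.List.mem_pyRange_one] at hj hi
      have hji : PySem.List.pyGetD (sales.foldl esrPfxStep [0]) j 0 = esrP sales j.toNat :=
        esr_pfx_pyGetD sales j (by omega) (by omega)
      have hii : PySem.List.pyGetD (sales.foldl esrPfxStep [0]) i 0 = esrP sales i.toNat :=
        esr_pfx_pyGetD sales i (by omega) (by omega)
      refine ⟨i.toNat, j.toNat, by omega, by omega, ?_, by omega⟩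
      rw [hji, hii] at hcond
      omega
  · exact Or.inl rfl

theorem esrB_ge (sales : List Int) (v : Int) (hv : esrCand sales v) : v ≤ longestESR_alt sales := by
  obtain ⟨i, j, hij, hjn, hp, hveq⟩ := hv
  unfold longestESR_alt
  refine esr_foldl_le_of_mem _ _ ?_ ?_ ((j : Int)) ?_ v ?_ 0
  · intro r x _
    apply esr_foldl_infl
    intro r' i' _
    split_ifs
    · exact le_max_left _ _
    · exact le_refl _
  · intro r r' x _ hrr'
    refine esr_foldl_mono _ _ ?_ _ _ hrr'
    intro a b i' _ hab
    split_ifs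
    · exact max_le_max_right _ hab
    · exact hab
  · rw [PySem.List.mem_pyRange_one]; omega
  · intro r
    unfold esrInner
    refine esr_foldl_le_of_mem _ _ ?_ ?_ ((i : Int)) ?_ v ?_ r
    · intro a x _
      split_ifs
      · exact le_max_left _ _
      · exact le_refl _
    · intro a b x _ hab
      split_ifs
      · exact max_le_max_right _ hab
      · exact hab
    · rw [PySem.List.mem_pyRange_one]; omega
    · intro a
      have hji : PySem.List.pyGetD (sales.foldl esrPfxStep [0]) (j : Int) 0 = esrP sales j := by
        rw [esr_pfx_pyGetD sales j (by omega) (by exact_mod_cast hjn)]; simp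
      have hii : PySem.List.pyGetD (sales.foldl esrPfxStep [0]) (i : Int) 0 = esrP sales i := by
        rw [esr_pfx_pyGetD sales i (by omega) (by exact_mod_cast Nat.le_of_lt (Nat.lt_of_lt_of_le hij hjn))]; simp
      rw [hji, hii, if_pos (by omega)]
      subst hveq
      exact le_max_right _ _

-- ===== A-side invariant =====

def esrAInv (sales : List Int) (t : Nat) (st : PySem.Dict Int Int × Int × Int) : Prop :=
  st.2.2 = esrP sales t ∧
  (∀ s e, st.1.get? s = some e ↔
    ∃ m : Nat, m ≤ t ∧ esrP sales m = s ∧ (∀ m' < m, esrP sales m' ≠ s) ∧ e = (m : Int) - 1) ∧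
  0 ≤ st.2.1 ∧
  (st.2.1 = 0 ∨ ∃ i j : Nat, i < j ∧ j ≤ t ∧ esrP sales i < esrP sales j ∧ st.2.1 = (j : Int) - i) ∧
  (∀ i j : Nat, i < j → j ≤ t → esrP sales i < esrP sales j → (j : Int) - i ≤ st.2.1)

theorem esrA_step (sales : List Int) (t : Nat) (ht : t < sales.length)
    (st : PySem.Dict Int Int × Int × Int) (hinv : esrAInv sales t st) :
    esrAInv sales (t + 1) (esrStep st ((t : Int), sales[t])) := by
  obtain ⟨pre, res, cur⟩ := st
  unfold esrAInv at hinv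
  dsimp only at hinv
  obtain ⟨hcur, hdict, hres0, hcand, hcomp⟩ := hinv
  unfold esrStep
  dsimp only
  set c : Int := cur + (if sales[t] > 8 then (1 : Int) else -1) with hc
  have hcur' : c = esrP sales (t + 1) := by
    rw [esrP_succ _ _ ht, hc, hcur]; rfl
  -- contains testing via first occurrences
  have hconNew : ∀ s : Int, pre.contains s = true ↔ ∃ m, m ≤ t ∧ esrP sales m = s := by
    intro s
    rw [PySem.Dict.contains_eq_isSome_get?]
    constructor
    · intro h
      obtain ⟨e, he⟩ := Option.isSome_iff_exists.mp h
      obtain ⟨m, hm1, hm2, _, _⟩ := (hdict s e).mp he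
      exact ⟨m, hm1, hm2⟩
    · rintro ⟨m, hm1, hm2⟩
      obtain ⟨m0, hm0m, hm0, hmin⟩ := esr_min_occ sales s m hm2
      have := (hdict s ((m0 : Int) - 1)).mpr ⟨m0, le_trans hm0m hm1, hm0, hmin, rfl⟩
      rw [this]
      rfl
  have hresle : res ≤ (t : Int) := by
    rcases hcand with h | ⟨i, j, hij, hjt, _, hv⟩
    · omega
    · have : (j : Int) ≤ (t : Int) := by exact_mod_cast hjt
      have : (0 : Int) ≤ (i : Int) := by positivity
      omega
  set r1 : Int := if c > 0 then (t : Int) + 1 else res with hr1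
  have hr1_ge : res ≤ r1 := by
    rw [hr1]; split_ifs <;> omega
  have hr1_0 : 0 ≤ r1 := le_trans hres0 hr1_ge
  have hr1_cand : r1 = 0 ∨ ∃ i j : Nat, i < j ∧ j ≤ t + 1 ∧ esrP sales i < esrP sales j ∧
      r1 = (j : Int) - i := by
    rw [hr1]; split_ifs with hcpos
    · refine Or.inr ⟨0, t + 1, by omega, le_refl _, ?_, by push_cast; ring⟩
      rw [esrP_zero, ← hcur']
      exact hcpos
    · rcases hcand with h | ⟨i, j, hij, hjt, hp, hv⟩
      · exact Or.inl h
      · exact Or.inr ⟨i, j, hij, by omega, hp, hv⟩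
  set r2 : Int := if pre.contains (c - 1) then max r1 ((t : Int) - pre.getD (c - 1) 0) else r1
    with hr2
  have hr2_ge : r1 ≤ r2 := by
    rw [hr2]; split_ifs
    · exact le_max_left _ _
    · exact le_refl _
  -- when the dict hit fires, its value is a first occurrence of c - 1
  have hhit : pre.contains (c - 1) = true →
      ∃ m0 : Nat, m0 ≤ t ∧ esrP sales m0 = c - 1 ∧ (∀ m' < m0, esrP sales m' ≠ c - 1) ∧
        pre.getD (c - 1) 0 = (m0 : Int) - 1 := by
    intro hct
    obtain ⟨m, hm1, hm2⟩ := (hconNew (c - 1)).mp hct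
    obtain ⟨m0, hm0m, hm0, hmin⟩ := esr_min_occ sales (c - 1) m hm2
    have hg := (hdict (c - 1) ((m0 : Int) - 1)).mpr ⟨m0, by omega, hm0, hmin, rfl⟩
    exact ⟨m0, by omega, hm0, hmin, PySem.Dict.getD_of_get?_eq_some _ _ hg⟩
  unfold esrAInv
  dsimp only
  refine ⟨hcur', ?_, le_trans hr1_0 hr2_ge, ?_, ?_⟩
  -- (b) dictionary invariant
  · intro s e
    by_cases hct : pre.contains c = true
    · rw [PySem.Dict.setdefault_of_contains pre ((t : Int)) hct, hdict s e]
      constructor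
      · rintro ⟨m, hm, h2, h3, h4⟩; exact ⟨m, by omega, h2, h3, h4⟩
      · rintro ⟨m, hm, h2, h3, h4⟩
        rcases Nat.lt_or_ge m (t + 1) with h | h
        · exact ⟨m, by omega, h2, h3, h4⟩
        · have hmeq : m = t + 1 := by omega
          subst hmeq
          exfalso
          obtain ⟨m0, hm0t, hm0⟩ := (hconNew c).mp hct
          exact h3 m0 (by omega) (by rw [hm0, hcur', ← h2])
    · rw [PySem.Dict.setdefault_of_not_contains pre ((t : Int)) (by simpa using hct),
        PySem.Dict.get?_insert]
      split_ifs with hsc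
      · subst hsc
        constructor
        · intro h
          have he : e = (t : Int) := by simpa using h.symm
          refine ⟨t + 1, le_refl _, hcur'.symm, ?_, by push_cast; omega⟩
          intro m' hm' hm'c
          exact hct ((hconNew c).mpr ⟨m', by omega, hm'c⟩)
        · rintro ⟨m, hm, h2, h3, h4⟩
          have hmt : m = t + 1 := by
            by_contra hne
            exact hct ((hconNew c).mpr ⟨m, by omega, h2⟩)
          subst hmt
          have : e = (t : Int) := by push_cast at h4; omega
          rw [this]
      · rw [hdict s e]
        constructor
        · rintro ⟨m, hm, h2, h3, h4⟩; exact ⟨m, by omega, h2, h3, h4⟩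
        · rintro ⟨m, hm, h2, h3, h4⟩
          rcases Nat.lt_or_ge m (t + 1) with h | h
          · exact ⟨m, by omega, h2, h3, h4⟩
          · have hmeq : m = t + 1 := by omega
            subst hmeq
            exact absurd (hcur'.trans h2).symm hsc
  -- (d) the result is 0 or a candidate interval length
  · rw [hr2]
    split_ifs with hct
    · rcases max_choice r1 ((t : Int) - pre.getD (c - 1) 0) with h | h
      · rw [h]; exact hr1_cand
      · rw [h]
        obtain ⟨m0, hm0t, hm0, _, hgd⟩ := hhit hct
        refine Or.inr ⟨m0, t + 1, by omega, le_refl _, ?_, by rw [hgd]; push_cast; ring⟩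
        rw [hm0, ← hcur']
        omega
    · exact hr1_cand
  -- (e) completeness
  · intro i j hij hjt1 hplt
    rcases Nat.lt_or_ge j (t + 1) with hjle | hjge
    · exact le_trans (hcomp i j hij (by omega) hplt) (le_trans hr1_ge hr2_ge)
    · have hjeq : j = t + 1 := by omega
      subst hjeq
      rw [← hcur'] at hplt
      by_cases hcpos : c > 0
      · have : r1 = (t : Int) + 1 := by rw [hr1, if_pos hcpos]
        have hi0 : (0 : Int) ≤ (i : Int) := by positivity
        push_cast
        omega
      · have hile : esrP sales i ≤ c - 1 := by omega
        have h0 : c - 1 ≤ esrP sales 0 := by rw [esrP_zero]; omega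
        obtain ⟨m, hmi, hm⟩ := esr_ivt sales (c - 1) h0 i hile
        obtain ⟨m0, hm0m, hm0, hmin⟩ := esr_min_occ sales (c - 1) m hm
        have hm0i : m0 ≤ i := by omega
        have hm0t : m0 ≤ t := by omega
        have hct : pre.contains (c - 1) = true := (hconNew (c - 1)).mpr ⟨m0, hm0t, hm0⟩
        obtain ⟨m1, hm1t, hm1, hmin1, hgd⟩ := hhit hct
        have hm1i : m1 ≤ i := by
          by_contra hgt
          exact hmin1 m0 (by omega) hm0
        have : r2 = max r1 ((t : Int) - ((m1 : Int) - 1)) := by rw [hr2, if_pos hct, hgd]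
        rw [this]
        have hle : (t : Int) + 1 - (i : Int) ≤ (t : Int) - ((m1 : Int) - 1) := by
          have : (m1 : Int) ≤ (i : Int) := by exact_mod_cast hm1i
          omega
        push_cast
        exact le_trans (by omega) (le_max_right _ _)

theorem esrA_loop (sales : List Int) :
    ∀ (l : List Int) (t : Nat) (st : PySem.Dict Int Int × Int × Int),
      sales.drop t = l → t ≤ sales.length → esrAInv sales t st →
      esrAInv sales sales.length ((PySem.List.enumerate l (t : Int)).foldl esrStep st) := by
  intro l
  induction l with
  | nil =>
    intro t st hdrop htn hinv
    have hlen : sales.length ≤ t := by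
      by_contra h
      have := List.drop_eq_getElem_cons (l := sales) (by omega : t < sales.length)
      rw [hdrop] at this
      exact List.cons_ne_nil _ _ this.symm
    have : t = sales.length := by omega
    subst this
    simpa [PySem.List.enumerate_nil] using hinv
  | cons x l' ih =>
    intro t st hdrop htn hinv
    have ht : t < sales.length := by
      by_contra h
      rw [List.drop_eq_nil_of_le (by omega)] at hdrop
      exact List.cons_ne_nil _ _ hdrop.symm
    have hx : sales[t] = x := by
      have := List.drop_eq_getElem_cons (l := sales) ht
      rw [hdrop] at this
      exact (List.cons.injEq _ _ _ _ ▸ this).1.symm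
    have hdrop' : sales.drop (t + 1) = l' := by
      rw [← List.tail_drop, hdrop, List.tail_cons]
    rw [PySem.List.enumerate_cons, List.foldl_cons]
    have := ih (t + 1) (esrStep st ((t : Int), x)) hdrop' (by omega)
      (hx ▸ esrA_step sales t ht st hinv)
    push_cast at this ⊢
    exact this

-- ===== VERDICT (by name: the statement is the Claim_ definition above) =====
theorem longestESR_spec : Claim_equal_longestESR := by
  intro sales _
  unfold Spec_longestESR longestESR
  have hinit : esrAInv sales 0 ((PySem.Dict.empty).insert 0 (-1), 0, 0) := by
    refine ⟨rfl, ?_, le_refl _, Or.inl rfl, ?_⟩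
    · intro s e
      rw [PySem.Dict.get?_insert]
      split_ifs with hs0
      · subst hs0
        constructor
        · intro h
          have : e = -1 := by simpa using h.symm
          exact ⟨0, le_refl _, esrP_zero sales, by omega, by omega⟩
        · rintro ⟨m, hm, _, _, h4⟩
          have : m = 0 := by omega
          subst this
          simp only [Nat.cast_zero] at h4
          rw [h4]
          norm_num
      · rw [PySem.Dict.get?_empty]
        constructor
        · intro h; exact absurd h (by simp)
        · rintro ⟨m, hm, h2, _, _⟩
          have : m = 0 := by omega
          subst this
          exact absurd ((esrP_zero sales).symm.trans h2).symm hs0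
    · intro i j hij hj0 _
      omega
  have hA := esrA_loop sales sales 0 ((PySem.Dict.empty).insert 0 (-1), 0, 0)
    (by simp) (by omega) hinit
  simp only [Nat.cast_zero] at hA
  obtain ⟨_, _, hA0, hAcand, hAcomp⟩ := hA
  apply le_antisymm
  · rcases hAcand with h | ⟨i, j, hij, hjn, hp, hv⟩
    · rw [h]; exact esrB_nonneg sales
    · rw [hv]; exact esrB_ge sales _ ⟨i, j, hij, hjn, hp, rfl⟩
  · rcases esrB_cases sales with h | ⟨i, j, hij, hjn, hp, hv⟩
    · rw [h]; exact hA0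
    · rw [hv]; exact hAcomp i j hij hjn hp
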